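-- pv_equiv track=rewrite | github.com/abhishekjha2468/HackerRank-Python | Validating Credit Card Number.py | count
-- ===== SOURCE A (Python) =====
-- def count(string):
-- 	string=string
-- 	Count=1
-- 	list=[]
-- 	for i in range(len(string)):
-- 		try:
-- 			if i<(len(string)-1):
-- 				if string[i]==string[i+1]:
-- 					Count=Count+1
-- 				else:
-- 					list.append(Count)
-- 					Count=1
-- 			else:
-- 				list.append(Count)
-- 		except:
-- 			list.append(Count)
-- 	return max(list)
-- ===== SOURCE B (Python) =====
-- def count(string):
--     n = len(string)
--     breaks = [i + 1 for i in range(n - 1) if string[i] != string[i + 1]]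
--     edges = [0] + breaks + [n]
--     return max(b - a for a, b in zip(edges, edges[1:]))
-- ===== Notes on version B (the rewrite author's own statement) =====
-- stated objective: alternative
-- what changed: B first computes the list of boundary positions where adjacent characters differ, pads it with 0 and len(string), and returns the maximum gap between consecutive boundaries, instead of A's stateful scan that grows a run counter and appends finished counts to a list.
import Mathlib
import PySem

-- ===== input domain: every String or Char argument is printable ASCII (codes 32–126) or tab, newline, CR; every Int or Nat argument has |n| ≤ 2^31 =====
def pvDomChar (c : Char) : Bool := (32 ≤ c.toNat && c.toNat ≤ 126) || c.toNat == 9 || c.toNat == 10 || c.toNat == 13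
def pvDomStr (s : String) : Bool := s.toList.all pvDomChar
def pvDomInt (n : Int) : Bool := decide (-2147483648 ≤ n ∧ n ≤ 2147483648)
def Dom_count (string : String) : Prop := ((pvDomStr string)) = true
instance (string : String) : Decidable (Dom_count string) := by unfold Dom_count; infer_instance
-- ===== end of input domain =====

-- B replaces A's stateful run-counting scan by a staged computation: the list of boundary
-- positions where adjacent characters differ, then the maximum gap between consecutive
-- boundaries (objective: alternative).

-- ===== PORT A =====
-- loop body: state = (Count, list); the try/except's except-branch is the last match arm
def countStepA (s : List Char) (st : Int × List Int) (i : Int) : Int × List Int :=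
  let Count := st.1
  let lst := st.2
  if i < (s.length : Int) - 1 then
    match PySem.List.pyGet? s i, PySem.List.pyGet? s (i + 1) with
    | some a, some b => if a == b then (Count + 1, lst) else (1, lst ++ [Count])
    | _, _ => (Count, lst ++ [Count])     -- except: list.append(Count)
  else (Count, lst ++ [Count])

def count (string : String) : Int :=
  let s := string.toList
  let st := (PySem.List.pyRange 0 (s.length : Int) 1).foldl (countStepA s) (1, [])
  -- max(list): raises ValueError on an empty list — excluded by Pre_count; 0 is a junk default
  (PySem.List.max? st.2 (fun x => x)).getD 0

-- ===== PORT B =====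
def count_alt (string : String) : Int :=
  let s := string.toList
  let n : Int := (s.length : Int)
  let breaks := ((PySem.List.pyRange 0 (n - 1) 1).filter
      (fun i => !(PySem.List.pyGet? s i == PySem.List.pyGet? s (i + 1)))).map (fun i => i + 1)
  let edges := [(0 : Int)] ++ breaks ++ [n]
  -- max(generator): the zipped list is never empty (edges has ≥ 2 elements), so getD 0 is unreachable junk
  (PySem.List.max? ((edges.zip edges.tail).map (fun p => p.2 - p.1)) (fun x => x)).getD 0

-- ===== PRECONDITION & SPEC =====
-- Pre_ excludes only the empty string, on which A's max([]) raises ValueError (B returns 0 there).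
def Pre_count (string : String) : Prop := string ≠ ""
instance (string : String) : Decidable (Pre_count string) := by unfold Pre_count; infer_instance
def pvWitness_count : String := "aab"

def Spec_count (string : String) (out : Int) : Prop := out = count_alt string
instance (string : String) (out : Int) : Decidable (Spec_count string out) := by unfold Spec_count; infer_instance

-- ===== CLAIM (what is proved, stated in full; the proofs are below) =====
def Claim_equal_count : Prop := ∀ (string : String), Dom_count string → Pre_count string → Spec_count string (count string)

-- ===== LEMMAS AND PROOFS =====

-- reference run-length list: what A's loop appends
def runsOf : List Char → Int → List Int
  | [], _ => []
  | [_], C => [C]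
  | a :: b :: t, C => if a == b then runsOf (b :: t) (C + 1) else C :: runsOf (b :: t) 1

-- A's loop over range(k, len(s)) appends exactly runsOf (s.drop k) C
theorem loopA (s : List Char) : ∀ (j k : Nat) (C : Int) (lst : List Int),
    k + j = s.length →
    ((PySem.List.pyRange (k : Int) (s.length : Int) 1).foldl (countStepA s) (C, lst)).2
      = lst ++ runsOf (s.drop k) C := by
  intro j
  induction j with
  | zero =>
    intro k C lst hk
    rw [PySem.List.pyRange_one_eq_nil (by omega)]
    simp [List.drop_eq_nil_of_le (by omega : s.length ≤ k), runsOf]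
  | succ j ih =>
    intro k C lst hk
    have hklt : k < s.length := by omega
    rw [PySem.List.pyRange_one_cons (by exact_mod_cast hklt)]
    have hdropk : s.drop k = s[k] :: s.drop (k + 1) := List.drop_eq_getElem_cons hklt
    by_cases hlast : k + 1 < s.length
    · have h1 : PySem.List.pyGet? s (k : Int) = some s[k] := by
        simp [PySem.List.pyGet?_natCast, List.getElem?_eq_getElem hklt]
      have h2 : PySem.List.pyGet? s ((k : Int) + 1) = some s[k + 1] := by
        rw [show ((k : Int) + 1) = ((k + 1 : Nat) : Int) by push_cast; ring,
          PySem.List.pyGet?_natCast, List.getElem?_eq_getElem hlast]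
      have hdropk1 : s.drop (k + 1) = s[k + 1] :: s.drop (k + 2) :=
        List.drop_eq_getElem_cons hlast
      simp only [List.foldl_cons, countStepA, if_pos (by omega :
        (k : Int) < (s.length : Int) - 1), h1, h2]
      have ih1 := ih (k + 1) (C + 1) lst (by omega)
      have ih2 := ih (k + 1) 1 (lst ++ [C]) (by omega)
      push_cast at ih1 ih2
      by_cases heq : s[k] == s[k + 1]
      · rw [if_pos heq, ih1, hdropk, hdropk1]
        simp only [runsOf, if_pos heq, ← hdropk1]
      · rw [if_neg heq, ih2, hdropk, hdropk1]
        simp only [runsOf, if_neg heq, ← hdropk1, List.append_assoc, List.singleton_append]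
    · have hkeq : k + 1 = s.length := by omega
      simp only [List.foldl_cons, countStepA,
        if_neg (by omega : ¬ ((k : Int) < (s.length : Int) - 1))]
      have ih3 := ih (k + 1) C (lst ++ [C]) (by omega)
      push_cast at ih3
      rw [ih3, List.drop_eq_nil_of_le (by omega : s.length ≤ k + 1), hdropk,
        List.drop_eq_nil_of_le (by omega : s.length ≤ k + 1)]
      simp [runsOf]

theorem count_eq_max_runs (string : String) :
    count string = (PySem.List.max? (runsOf string.toList 1) (fun x => x)).getD 0 := by
  simp only [count]
  have hl := loopA string.toList string.toList.length 0 1 [] (by omega)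
  push_cast at hl
  rw [hl]
  simp

-- boundary positions of s when s starts at absolute position p (first char is s[0] at index p)
def bnd : List Char → Int → List Int
  | [], _ => []
  | [_], _ => []
  | a :: b :: t, p => if a == b then bnd (b :: t) (p + 1) else (p + 1) :: bnd (b :: t) (p + 1)

def gapsL (l : List Int) : List Int := (l.zip l.tail).map (fun p => p.2 - p.1)

theorem gapsL_cons_cons (e x : Int) (r : List Int) :
    gapsL (e :: x :: r) = (x - e) :: gapsL (x :: r) := by
  simp [gapsL]

-- gaps between padded boundaries = the run-length list
theorem gaps_bnd (t : List Char) : ∀ (a : Char) (e p : Int),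
    gapsL (e :: (bnd (a :: t) p ++ [p + 1 + (t.length : Int)])) = runsOf (a :: t) (p + 1 - e) := by
  induction t with
  | nil =>
    intro a e p
    simp [bnd, runsOf, gapsL]
  | cons b t' ih =>
    intro a e p
    simp only [bnd, runsOf]
    by_cases heq : a == b
    · rw [if_pos heq, if_pos heq]
      have := ih b e (p + 1)
      have harith : p + 1 + ((b :: t').length : Int) = (p + 1) + 1 + (t'.length : Int) := by
        simp [List.length_cons]; ring
      rw [harith, this]
      congr 1
      ring
    · rw [if_neg heq, if_neg heq]
      have harith : p + 1 + ((b :: t').length : Int) = (p + 1) + 1 + (t'.length : Int) := by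
        simp [List.length_cons]; ring
      rw [List.cons_append, gapsL_cons_cons, harith, ih b (p + 1) (p + 1)]
      congr 2
      ring

-- B's comprehension over range(k, n-1) computes bnd (s.drop k) k
theorem breaks_eq_bnd (s : List Char) : ∀ (j k : Nat), k + j + 1 = s.length →
    ((PySem.List.pyRange (k : Int) ((s.length : Int) - 1) 1).filter
      (fun i => !(PySem.List.pyGet? s i == PySem.List.pyGet? s (i + 1)))).map (fun i => i + 1)
     = bnd (s.drop k) (k : Int) := by
  intro j
  induction j with
  | zero =>
    intro k hk
    rw [PySem.List.pyRange_one_eq_nil (by omega)]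
    have hklt : k < s.length := by omega
    have hdropk : s.drop k = s[k] :: s.drop (k + 1) := List.drop_eq_getElem_cons hklt
    rw [hdropk, List.drop_eq_nil_of_le (by omega : s.length ≤ k + 1)]
    simp [bnd]
  | succ j ih =>
    intro k hk
    have hklt : k < s.length := by omega
    have hlast : k + 1 < s.length := by omega
    rw [PySem.List.pyRange_one_cons (by omega : (k : Int) < (s.length : Int) - 1)]
    have h1 : PySem.List.pyGet? s (k : Int) = some s[k] := by
      simp [PySem.List.pyGet?_natCast, List.getElem?_eq_getElem hklt]
    have h2 : PySem.List.pyGet? s ((k : Int) + 1) = some s[k + 1] := by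
      rw [show ((k : Int) + 1) = ((k + 1 : Nat) : Int) by push_cast; ring,
        PySem.List.pyGet?_natCast, List.getElem?_eq_getElem hlast]
    have hdropk : s.drop k = s[k] :: s.drop (k + 1) := List.drop_eq_getElem_cons hklt
    have hdropk1 : s.drop (k + 1) = s[k + 1] :: s.drop (k + 2) := List.drop_eq_getElem_cons hlast
    have ihk := ih (k + 1) (by omega)
    push_cast at ihk
    rw [hdropk, hdropk1]
    simp only [List.filter_cons, h1, h2]
    by_cases heq : s[k] == s[k + 1]
    · rw [show (!(some s[k] == some s[k+1])) = false by simp [heq]]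
      simp only [Bool.false_eq_true, if_false, bnd, if_pos heq, ← hdropk1, ihk]
    · rw [show (!(some s[k] == some s[k+1])) = true by simp [heq]]
      simp only [if_true, List.map_cons, bnd, if_neg heq, ← hdropk1, ihk]

theorem alt_eq_max_runs (string : String) (h : string.toList ≠ []) :
    count_alt string = (PySem.List.max? (runsOf string.toList 1) (fun x => x)).getD 0 := by
  obtain ⟨a, t, hs⟩ : ∃ a t, string.toList = a :: t := by
    cases hmm : string.toList with
    | nil => exact absurd hmm h
    | cons a t => exact ⟨a, t, rfl⟩
  simp only [count_alt]
  have hb := breaks_eq_bnd string.toList t.length 0 (by rw [hs]; simp)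
  push_cast at hb
  rw [hb]
  have hedges : [(0 : Int)] ++ bnd (string.toList.drop 0) 0 ++ [(string.toList.length : Int)]
      = (0 : Int) :: (bnd (a :: t) 0 ++ [0 + 1 + (t.length : Int)]) := by
    rw [List.drop_zero, hs]
    simp [List.length_cons]
    ring
  rw [hedges]
  have hg : (((0 : Int) :: (bnd (a :: t) 0 ++ [0 + 1 + (t.length : Int)])).zip
        ((0 : Int) :: (bnd (a :: t) 0 ++ [0 + 1 + (t.length : Int)])).tail).map (fun p => p.2 - p.1)
      = gapsL ((0 : Int) :: (bnd (a :: t) 0 ++ [0 + 1 + (t.length : Int)])) := rfl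
  rw [hg, gaps_bnd t a 0 0, hs]
  norm_num

-- ===== VERDICT (by name: the statement is the Claim_ definition above) =====
theorem count_spec : Claim_equal_count := by
  intro string _ hpre
  unfold Spec_count
  rw [count_eq_max_runs, alt_eq_max_runs]
  intro hnil
  exact hpre (String.toList_eq_nil_iff.mp hnil)
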